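-- pv_equiv track=rewrite | github.com/luckylecher/cpp | ainst2/local_ainst_operator.py | _mergeActivePkgs
-- ===== SOURCE A (Python) =====
-- def _mergeActivePkgs(nowActivePkgs, willActivePkgs, willDeactivePkgs):
--     activePkgs = []
--     if nowActivePkgs:
--         activePkgs.extend(nowActivePkgs)
--     if willActivePkgs:
--         for pkg in willActivePkgs:
--             activePkgs.append(str(pkg))
--     if willDeactivePkgs:
--         for pkg in willDeactivePkgs:
--             if str(pkg) in activePkgs:
--                 activePkgs.remove(str(pkg))
--     return activePkgs
-- ===== SOURCE B (Python) =====
-- def _mergeActivePkgs(nowActivePkgs, willActivePkgs, willDeactivePkgs):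
--     # Tally removal requests once, then drop matches in a single forward pass.
--     counts = {}
--     for pkg in (willDeactivePkgs or []):
--         key = str(pkg)
--         counts[key] = counts.get(key, 0) + 1
--     merged = list(nowActivePkgs) if nowActivePkgs else []
--     if willActivePkgs:
--         merged.extend(str(pkg) for pkg in willActivePkgs)
--     result = []
--     for x in merged:
--         if counts.get(x, 0) > 0:
--             counts[x] = counts[x] - 1
--         else:
--             result.append(x)
--     return result
-- ===== Notes on version B (the rewrite author's own statement) =====
-- stated objective: faster
-- what changed: Replaces the per-deactivation membership-test-and-remove scans with a removal counter built once followed by a single forward pass that drops the first min(present,requested) occurrences of each package.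
import Mathlib
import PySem

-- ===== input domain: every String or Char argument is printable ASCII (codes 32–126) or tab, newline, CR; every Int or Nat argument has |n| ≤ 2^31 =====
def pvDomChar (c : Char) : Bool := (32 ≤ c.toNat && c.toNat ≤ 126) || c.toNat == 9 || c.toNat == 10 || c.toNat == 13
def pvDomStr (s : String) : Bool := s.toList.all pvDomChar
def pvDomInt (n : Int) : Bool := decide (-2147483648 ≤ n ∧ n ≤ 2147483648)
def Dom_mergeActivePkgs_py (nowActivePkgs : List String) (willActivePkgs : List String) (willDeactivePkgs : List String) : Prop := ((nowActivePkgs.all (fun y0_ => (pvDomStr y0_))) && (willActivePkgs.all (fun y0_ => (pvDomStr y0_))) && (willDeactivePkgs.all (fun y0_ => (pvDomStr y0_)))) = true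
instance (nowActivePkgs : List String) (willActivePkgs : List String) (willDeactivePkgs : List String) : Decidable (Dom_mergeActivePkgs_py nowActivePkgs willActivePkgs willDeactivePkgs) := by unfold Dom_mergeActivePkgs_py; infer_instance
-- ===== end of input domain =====

-- B replaces A's repeated membership-test-and-remove scans by a removal counter
-- built once plus a single forward pass (objective: faster, O(n+d) vs O(n*d)).

-- ===== PORT A =====
-- Literal transliteration of A: build activePkgs, then for each deactivation
-- request test membership and remove the first occurrence.
def mergeActivePkgs_py (nowActivePkgs : List String) (willActivePkgs : List String) (willDeactivePkgs : List String) : List String :=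
  let activePkgs : List String := []
  let activePkgs := if nowActivePkgs ≠ [] then activePkgs ++ nowActivePkgs else activePkgs
  let activePkgs :=
    if willActivePkgs ≠ [] then
      willActivePkgs.foldl (fun a pkg => a ++ [pkg]) activePkgs   -- str(pkg) on a str is pkg
    else activePkgs
  if willDeactivePkgs ≠ [] then
    willDeactivePkgs.foldl
      (fun a pkg => if pkg ∈ a then (PySem.List.remove? a pkg).getD a else a) activePkgs
  else activePkgs

-- ===== PORT B =====
-- Transliteration of Source B: counter dict over willDeactivePkgs, then one pass
-- over the merged list carrying (counts, result).
def mergeActivePkgs_py_alt (nowActivePkgs : List String) (willActivePkgs : List String) (willDeactivePkgs : List String) : List String :=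
  let counts : PySem.Dict String Int :=
    (if willDeactivePkgs ≠ [] then willDeactivePkgs else []).foldl
      (fun d key => d.insert key (d.getD key 0 + 1)) PySem.Dict.empty
  let merged := if nowActivePkgs ≠ [] then nowActivePkgs else []
  let merged := if willActivePkgs ≠ [] then merged ++ willActivePkgs else merged
  (merged.foldl
    (fun (st : PySem.Dict String Int × List String) x =>
      if st.1.getD x 0 > 0 then (st.1.insert x (st.1.getD x 0 - 1), st.2)
      else (st.1, st.2 ++ [x]))
    (counts, [])).2

-- ===== PRECONDITION & SPEC =====
def Spec_mergeActivePkgs_py (nowActivePkgs : List String) (willActivePkgs : List String) (willDeactivePkgs : List String) (out : List String) : Prop := out = mergeActivePkgs_py_alt nowActivePkgs willActivePkgs willDeactivePkgs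
instance (nowActivePkgs : List String) (willActivePkgs : List String) (willDeactivePkgs : List String) (out : List String) : Decidable (Spec_mergeActivePkgs_py nowActivePkgs willActivePkgs willDeactivePkgs out) := by unfold Spec_mergeActivePkgs_py; infer_instance

-- ===== CLAIM (what is proved, stated in full; the proofs are below) =====
def Claim_equal_mergeActivePkgs_py : Prop := ∀ (nowActivePkgs : List String) (willActivePkgs : List String) (willDeactivePkgs : List String), Dom_mergeActivePkgs_py nowActivePkgs willActivePkgs willDeactivePkgs → Spec_mergeActivePkgs_py nowActivePkgs willActivePkgs willDeactivePkgs (mergeActivePkgs_py nowActivePkgs willActivePkgs willDeactivePkgs)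

-- ===== LEMMAS AND PROOFS =====

-- b.foldl (· ++ [·]) = append (used to read A's willActivePkgs loop).
theorem foldl_append_singleton (l : List String) (acc : List String) :
    l.foldl (fun a x => a ++ [x]) acc = acc ++ l := by
  induction l generalizing acc with
  | nil => simp
  | cons x xs ih => simp [ih]

-- Common semantic core: filter a list dropping, per value, as many occurrences
-- as the (nonnegative) count function allows, front to back.
def filterC (cnt : String → Int) : List String → List String
  | [] => []
  | x :: xs =>
      if cnt x > 0 then filterC (fun s => if s = x then cnt s - 1 else cnt s) xs
      else x :: filterC cnt xs

theorem filterC_congr (cnt cnt' : String → Int) (a : List String)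
    (h : ∀ s, cnt s = cnt' s) : filterC cnt a = filterC cnt' a := by
  have : cnt = cnt' := funext h
  rw [this]

theorem filterC_nonpos (cnt : String → Int) (a : List String)
    (h : ∀ s, cnt s ≤ 0) : filterC cnt a = a := by
  induction a with
  | nil => rfl
  | cons x xs ih =>
      simp only [filterC]
      rw [if_neg (by have := h x; omega)]
      rw [ih]

-- A's one removal step is List.erase.
theorem removeStep_eq_erase (a : List String) (p : String) :
    (if p ∈ a then (PySem.List.remove? a p).getD a else a) = a.erase p := by
  by_cases hp : p ∈ a
  · rw [if_pos hp, PySem.List.remove?_eq_some_erase a p hp]; rfl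
  · rw [if_neg hp, List.erase_of_not_mem hp]

-- Bumping the budget of p by one is the same as first erasing p's first occurrence.
theorem filterC_inc_erase (a : List String) (cnt : String → Int) (p : String)
    (hnn : ∀ s, 0 ≤ cnt s) :
    filterC (fun s => if s = p then cnt s + 1 else cnt s) a = filterC cnt (a.erase p) := by
  induction a generalizing cnt with
  | nil => rfl
  | cons x xs ih =>
      by_cases hxp : x = p
      · subst hxp
        simp only [filterC, List.erase_cons_head]
        rw [if_pos (by have := hnn x; simp; omega)]
        apply filterC_congr
        intro s
        by_cases hs : s = x <;> simp [hs]
      · rw [List.erase_cons_tail (by simp [hxp])]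
        simp only [filterC]
        have hx : (if x = p then cnt x + 1 else cnt x) = cnt x := by rw [if_neg hxp]
        rw [hx]
        by_cases hpos : cnt x > 0
        · rw [if_pos hpos, if_pos hpos]
          have := ih (cnt := fun s => if s = x then cnt s - 1 else cnt s)
            (by intro s; by_cases hs : s = x <;> simp [hs] <;> [omega; exact hnn s])
          rw [← this]
          apply filterC_congr
          intro s
          by_cases hsp : s = p <;> by_cases hsx : s = x <;>
            simp [hsp, hsx, hxp] <;> simp_all
        · rw [if_neg hpos, if_neg hpos, ih cnt hnn]

-- A's deactivation loop is filterC with the multiset of requests.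
theorem foldl_remove_eq_filterC (ds : List String) (a : List String) :
    ds.foldl (fun a pkg => if pkg ∈ a then (PySem.List.remove? a pkg).getD a else a) a
      = filterC (fun s => (ds.count s : Int)) a := by
  induction ds generalizing a with
  | nil =>
      simp only [List.foldl_nil]
      rw [filterC_nonpos] <;> simp
  | cons p ds ih =>
      simp only [List.foldl_cons]
      rw [removeStep_eq_erase, ih]
      rw [← filterC_inc_erase a (fun s => (ds.count s : Int)) p (by intro s; positivity)]
      apply filterC_congr
      intro s
      by_cases hs : s = p
      · simp [hs, List.count_cons]
      · simp [List.count_cons, hs, Ne.symm hs]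

-- The counter dict built by B, read through getD, is the count function.
theorem counter_getD (ds : List String) (d : PySem.Dict String Int) (s : String) :
    (ds.foldl (fun d key => d.insert key (d.getD key 0 + 1)) d).getD s 0
      = d.getD s 0 + (ds.count s : Int) := by
  induction ds generalizing d with
  | nil => simp
  | cons k ds ih =>
      simp only [List.foldl_cons]
      rw [ih, PySem.Dict.getD_insert]
      by_cases hs : s = k
      · subst hs; simp; omega
      · simp [hs, Ne.symm hs]

-- B's single pass is filterC of the dict's count view, appended to the accumulator.
theorem pass_eq_filterC (a : List String) (d : PySem.Dict String Int) (acc : List String) :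
    (a.foldl
      (fun (st : PySem.Dict String Int × List String) x =>
        if st.1.getD x 0 > 0 then (st.1.insert x (st.1.getD x 0 - 1), st.2)
        else (st.1, st.2 ++ [x]))
      (d, acc)).2 = acc ++ filterC (fun s => d.getD s 0) a := by
  induction a generalizing d acc with
  | nil => simp [filterC]
  | cons x xs ih =>
      simp only [List.foldl_cons, filterC]
      by_cases hpos : d.getD x 0 > 0
      · rw [if_pos hpos, if_pos hpos, ih]
        congr 1
        apply filterC_congr
        intro s
        rw [PySem.Dict.getD_insert]
        by_cases hs : s = x <;> simp [hs]
      · rw [if_neg hpos, if_neg hpos, ih]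
        simp

-- ===== VERDICT (by name: the statement is the Claim_ definition above) =====
theorem mergeActivePkgs_py_spec : Claim_equal_mergeActivePkgs_py := by
  intro now will deact _
  unfold Spec_mergeActivePkgs_py mergeActivePkgs_py mergeActivePkgs_py_alt
  -- normalise the truthiness branches on both sides
  have hnow : (if now ≠ [] then ([] : List String) ++ now else []) = now := by
    by_cases h : now = [] <;> simp [h]
  have hwillA : ∀ (b : List String),
      (if will ≠ [] then will.foldl (fun a pkg => a ++ [pkg]) b else b) = b ++ will := by
    intro b
    by_cases h : will = []
    · simp [h]
    · rw [if_pos h, foldl_append_singleton]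
  have hwillB : ∀ (b : List String), (if will ≠ [] then b ++ will else b) = b ++ will := by
    intro b; by_cases h : will = [] <;> simp [h]
  have hdeactL : (if deact ≠ [] then deact else []) = deact := by
    by_cases h : deact = [] <;> simp [h]
  have hnow2 : (if now ≠ [] then now else []) = now := by
    by_cases h : now = [] <;> simp [h]
  simp only [hnow, hnow2, hwillA, hwillB, hdeactL]
  have hA :
      (if deact ≠ [] then
        deact.foldl (fun a pkg => if pkg ∈ a then (PySem.List.remove? a pkg).getD a else a)
          (now ++ will)
       else now ++ will)
      = filterC (fun s => (deact.count s : Int)) (now ++ will) := by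
    by_cases h : deact = []
    · subst h
      simp only [ne_eq, not_true_eq_false, if_false]
      rw [filterC_nonpos] <;> simp
    · rw [if_pos h, foldl_remove_eq_filterC]
  rw [hA, pass_eq_filterC]
  rw [List.nil_append]
  apply filterC_congr
  intro s
  rw [counter_getD]
  simp
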